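-- pv_equiv track=rewrite | github.com/LuminaireCognition/aria | src/aria_esi/archetypes/tuning.py | _parse_eft_header
-- ===== SOURCE A (Python) =====
-- def _parse_eft_header(eft: str) -> tuple[str, str]:
--     """
--     Parse the EFT header to get ship and fit name.
--
--     Returns:
--         Tuple of (ship_name, fit_name)
--     """
--     lines = eft.strip().split("\n")
--     for line in lines:
--         line = line.strip()
--         if line.startswith("[") and "]" in line:
--             # Format: [Ship, Fit Name]
--             content = line[1:].split("]")[0]
--             parts = content.split(",", 1)
--             ship = parts[0].strip()
--             fit_name = parts[1].strip() if len(parts) > 1 else ""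
--             return ship, fit_name
--     return "", ""
-- ===== SOURCE B (Python) =====
-- def _parse_eft_header(eft: str) -> tuple[str, str]:
--     """Single-pass character-level finite state machine: instead of splitting
--     into lines and running per-line strip/startswith/contains/split passes, walk
--     the stripped text once with four states (line start, skipping a non-header
--     line, collecting ship chars, collecting fit-name chars) and return as soon
--     as the closing bracket of the first header line is reached."""
--     NEWLINE, SHIP, FIT, SKIP = 0, 1, 2, 3
--     state = NEWLINE
--     ship: list[str] = []
--     fit: list[str] = []
--     for ch in eft.strip():
--         if state == NEWLINE:
--             if ch.isspace():
--                 continue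
--             elif ch == "[":
--                 state = SHIP
--             else:
--                 state = SKIP
--         elif state == SKIP:
--             if ch == "\n":
--                 state = NEWLINE
--         elif state == SHIP:
--             if ch == "\n":
--                 ship = []
--                 fit = []
--                 state = NEWLINE
--             elif ch == "]":
--                 return "".join(ship).strip(), ""
--             elif ch == ",":
--                 state = FIT
--             else:
--                 ship.append(ch)
--         else:  # FIT
--             if ch == "\n":
--                 ship = []
--                 fit = []
--                 state = NEWLINE
--             elif ch == "]":
--                 return "".join(ship).strip(), "".join(fit).strip()
--             else:
--                 fit.append(ch)
--     return "", ""
-- ===== Notes on version B (the rewrite author's own statement) =====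
-- stated objective: alternative
-- what changed: A splits the stripped text into a list of lines and runs strip/startswith/contains/split/split/strip passes over each line; B never builds lines or substrings: it walks the stripped text once as a four-state finite state machine (line start / skip line / collecting ship / collecting fit name) with two accumulators and returns the moment the first header's closing bracket is seen.
import Mathlib
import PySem

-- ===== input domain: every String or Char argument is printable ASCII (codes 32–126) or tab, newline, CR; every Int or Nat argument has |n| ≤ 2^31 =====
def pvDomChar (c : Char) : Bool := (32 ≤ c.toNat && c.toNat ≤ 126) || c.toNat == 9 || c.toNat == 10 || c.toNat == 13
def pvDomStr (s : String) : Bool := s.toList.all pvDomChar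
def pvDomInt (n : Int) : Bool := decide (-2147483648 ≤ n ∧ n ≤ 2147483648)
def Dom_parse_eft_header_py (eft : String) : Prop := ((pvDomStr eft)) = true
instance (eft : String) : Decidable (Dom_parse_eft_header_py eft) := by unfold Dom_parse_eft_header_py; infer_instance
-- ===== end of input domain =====

-- B replaces A's line list + per-line string-method passes by a single-pass
-- four-state finite state machine over the characters (objective: alternative).

-- ===== PORT A =====
-- the for-loop over lines with early return
def pvA_loop : List (List Char) → String × String
  | [] => ("", "")
  | l :: rest =>
    let line := PySem.Chars.strip l
    if PySem.Chars.startswith line ['['] && PySem.Chars.isIn [']'] line then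
      let content := PySem.List.pyGetD (PySem.Chars.splitOn (PySem.List.slice line (some 1) none) [']']) 0 []
      let parts := PySem.Chars.splitOnMax content [','] 1
      let ship := PySem.Chars.strip (PySem.List.pyGetD parts 0 [])
      let fit := if 1 < parts.length then PySem.Chars.strip (PySem.List.pyGetD parts 1 []) else []
      (String.ofList ship, String.ofList fit)
    else pvA_loop rest

def parse_eft_header_py (eft : String) : String × String :=
  pvA_loop (PySem.Chars.splitOn (PySem.Chars.strip eft.toList) ['\n'])

-- ===== PORT B =====
-- Source B's for-loop over the characters of eft.strip(): state 0 = NEWLINE (at line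
-- start), 1 = SHIP, 2 = FIT, 3 = SKIP; s / f are the ship / fit accumulator lists.
def pvB_step : List Char → Nat → List Char → List Char → String × String
  | [], _, _, _ => ("", "")                           -- loop ended: return "", ""
  | ch :: r, st, s, f =>
    if st == 0 then                                   -- NEWLINE
      if PySem.Chars.strIsspace [ch] then pvB_step r 0 s f
      else if ch == '[' then pvB_step r 1 s f
      else pvB_step r 3 s f
    else if st == 3 then                              -- SKIP
      if ch == '\n' then pvB_step r 0 s f else pvB_step r 3 s f
    else if st == 1 then                              -- SHIP
      if ch == '\n' then pvB_step r 0 [] []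
      else if ch == ']' then (String.ofList (PySem.Chars.strip s), "")
      else if ch == ',' then pvB_step r 2 s f
      else pvB_step r 1 (s ++ [ch]) f
    else                                              -- FIT
      if ch == '\n' then pvB_step r 0 [] []
      else if ch == ']' then (String.ofList (PySem.Chars.strip s), String.ofList (PySem.Chars.strip f))
      else pvB_step r 2 s (f ++ [ch])

def parse_eft_header_py_alt (eft : String) : String × String :=
  pvB_step (PySem.Chars.strip eft.toList) 0 [] []

-- ===== PRECONDITION & SPEC =====
def Spec_parse_eft_header_py (eft : String) (out : String × String) : Prop := out = parse_eft_header_py_alt eft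
instance (eft : String) (out : String × String) : Decidable (Spec_parse_eft_header_py eft out) := by unfold Spec_parse_eft_header_py; infer_instance

-- ===== CLAIM (what is proved, stated in full; the proofs are below) =====
def Claim_equal_parse_eft_header_py : Prop := ∀ (eft : String), Dom_parse_eft_header_py eft → Spec_parse_eft_header_py eft (parse_eft_header_py eft)

-- ===== LEMMAS AND PROOFS =====

lemma pv_go_spec (c : Char) : ∀ (fuel : Nat) (l cur : List Char) (acc : List (List Char)),
    l.length ≤ fuel →
    PySem.Chars.splitOn.go [c] fuel l cur acc
      = acc.reverse ++ (l.splitOnP (· == c)).modifyHead (cur.reverse ++ ·) := by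
  intro fuel
  induction fuel with
  | zero =>
    intro l cur acc h
    have hl : l = [] := by cases l <;> simp_all
    subst hl
    simp [PySem.Chars.splitOn.go, List.splitOnP_nil]
  | succ n ih =>
    intro l cur acc h
    cases l with
    | nil => simp [PySem.Chars.splitOn.go, List.splitOnP_nil]
    | cons x rest =>
      simp only [List.length_cons, Nat.add_le_add_iff_right] at h
      by_cases hx : x = c
      · subst hx
        have step : PySem.Chars.splitOn.go [x] (n+1) (x :: rest) cur acc
            = PySem.Chars.splitOn.go [x] n rest [] (cur.reverse :: acc) := by
          simp [PySem.Chars.splitOn.go]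
        rw [step, ih rest [] (cur.reverse :: acc) h]
        simp [List.splitOnP_cons]
        exact (congrFun List.modifyHead_id _)
      · have hcx : (c == x) = false := by simp [Ne.symm hx]
        have step : PySem.Chars.splitOn.go [c] (n+1) (x :: rest) cur acc
            = PySem.Chars.splitOn.go [c] n rest (x :: cur) acc := by
          simp [PySem.Chars.splitOn.go, List.isPrefixOf, hcx]
        rw [step, ih rest (x :: cur) acc h]
        have hpx : (x == c) = false := by simp [hx]
        simp only [List.splitOnP_cons, hpx, Bool.false_eq_true, if_false,
          List.modifyHead_modifyHead]
        simp [Function.comp_def]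

lemma pv_splitOn_eq (s : List Char) (c : Char) :
    PySem.Chars.splitOn s [c] = s.splitOnP (· == c) := by
  have h := pv_go_spec c (s.length + 1) s [] [] (by omega)
  simp only [List.reverse_nil, List.nil_append] at h
  rw [PySem.Chars.splitOn, h]
  exact congrFun List.modifyHead_id _

lemma pv_goMax0 (c : Char) (fuel : Nat) (l cur : List Char) (acc : List (List Char)) :
    PySem.Chars.splitOnMax.go [c] fuel 0 l cur acc = acc.reverse ++ [cur.reverse ++ l] := by
  cases fuel <;> cases l <;> simp [PySem.Chars.splitOnMax.go]

lemma pv_goMax1 (c : Char) : ∀ (fuel : Nat) (l cur : List Char) (acc : List (List Char)),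
    l.length ≤ fuel →
    PySem.Chars.splitOnMax.go [c] fuel 1 l cur acc
      = acc.reverse ++ (if c ∈ l then
          [cur.reverse ++ l.takeWhile (fun x => !(x == c)), (l.dropWhile (fun x => !(x == c))).tail]
        else [cur.reverse ++ l]) := by
  intro fuel
  induction fuel with
  | zero =>
    intro l cur acc h
    have hl : l = [] := by cases l <;> simp_all
    subst hl
    simp [PySem.Chars.splitOnMax.go]
  | succ n ih =>
    intro l cur acc h
    cases l with
    | nil => simp [PySem.Chars.splitOnMax.go]
    | cons x rest =>
      simp only [List.length_cons, Nat.add_le_add_iff_right] at h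
      by_cases hx : x = c
      · subst hx
        have step : PySem.Chars.splitOnMax.go [x] (n+1) 1 (x :: rest) cur acc
            = PySem.Chars.splitOnMax.go [x] n 0 (List.drop 1 (x :: rest)) [] (cur.reverse :: acc) := by
          simp [PySem.Chars.splitOnMax.go]
        rw [step]
        simp [pv_goMax0]
      · have hcx : (c == x) = false := by simp [Ne.symm hx]
        have step : PySem.Chars.splitOnMax.go [c] (n+1) 1 (x :: rest) cur acc
            = PySem.Chars.splitOnMax.go [c] n 1 rest (x :: cur) acc := by
          simp [PySem.Chars.splitOnMax.go, List.isPrefixOf, hcx]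
        rw [step, ih rest (x :: cur) acc h]
        have hpx : (x == c) = false := by simp [hx]
        by_cases hm : c ∈ rest
        · have : c ∈ x :: rest := List.mem_cons_of_mem _ hm
          simp [hm, this, hpx]
        · have : c ∉ x :: rest := by
            intro hc
            rcases List.mem_cons.mp hc with h1 | h1
            · exact hx h1.symm
            · exact hm h1
          simp [hm, this]

lemma pv_splitOnMax_one (s : List Char) (c : Char) :
    PySem.Chars.splitOnMax s [c] 1
      = if c ∈ s then [s.takeWhile (fun x => !(x == c)), (s.dropWhile (fun x => !(x == c))).tail]
        else [s] := by
  have h := pv_goMax1 c (s.length + 1) s [] [] (by omega)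
  have h1 : ¬ ((1:Int) < 0) := by norm_num
  simp only [PySem.Chars.splitOnMax, h1, if_false] at *
  simpa using h

lemma pv_splitOnP_of_mem (c : Char) (l : List Char) (h : c ∈ l) :
    l.splitOnP (· == c)
      = l.takeWhile (fun x => !(x == c)) :: ((l.dropWhile (fun x => !(x == c))).tail).splitOnP (· == c) := by
  induction l with
  | nil => simp at h
  | cons x rest ih =>
    by_cases hx : x = c
    · subst hx
      simp [List.splitOnP_cons]
    · have hpx : (x == c) = false := by simp [hx]
      have hm : c ∈ rest := by
        rcases List.mem_cons.mp h with h1 | h1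
        · exact absurd h1.symm hx
        · exact h1
      simp [List.splitOnP_cons, hpx, ih hm]

lemma pv_break_at (c : Char) (l : List Char) (h : c ∈ l) :
    l = l.takeWhile (fun x => !(x == c)) ++ c :: (l.dropWhile (fun x => !(x == c))).tail := by
  induction l with
  | nil => simp at h
  | cons x rest ih =>
    by_cases hx : x = c
    · subst hx; simp
    · have hpx : (x == c) = false := by simp [hx]
      have hm : c ∈ rest := by
        rcases List.mem_cons.mp h with h1 | h1
        · exact absurd h1.symm hx
        · exact h1
      simp only [List.takeWhile_cons, List.dropWhile_cons, hpx, Bool.not_false, if_true,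
        List.cons_append]
      exact congrArg (x :: ·) (ih hm)

lemma pv_splitOn_head (s : List Char) (c : Char) :
    PySem.List.pyGetD (PySem.Chars.splitOn s [c]) 0 [] = s.takeWhile (fun x => !(x == c)) := by
  rw [pv_splitOn_eq]
  by_cases h : c ∈ s
  · rw [pv_splitOnP_of_mem c s h]
    simp [PySem.List.pyGetD_zero_cons]
  · rw [List.splitOnP_eq_single]
    · rw [PySem.List.pyGetD_zero_cons]
      rw [List.takeWhile_eq_self_iff.mpr]
      intro x hx
      simp only [Bool.not_eq_eq_eq_not, Bool.not_true, beq_eq_false_iff_ne, ne_eq]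
      exact fun e => h (e ▸ hx)
    · intro x hx
      simp only [beq_iff_eq]
      exact fun e => h (e ▸ hx)

lemma pv_rstrip_exists (l : List Char) :
    ∃ w, l = PySem.Chars.rstrip l ++ w ∧ ∀ x ∈ w, PySem.Chars.isspace x = true := by
  refine ⟨(l.reverse.takeWhile PySem.Chars.isspace).reverse, ?_, ?_⟩
  · conv_lhs => rw [← l.reverse_reverse,
      ← List.takeWhile_append_dropWhile (p := PySem.Chars.isspace) (l := l.reverse)]
    rw [List.reverse_append]
    rfl
  · intro x hx
    rw [List.mem_reverse] at hx
    exact List.mem_takeWhile_imp hx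

lemma pv_rstrip_cons (c : Char) (l : List Char) (hc : PySem.Chars.isspace c = false) :
    PySem.Chars.rstrip (c :: l) = c :: PySem.Chars.rstrip l := by
  unfold PySem.Chars.rstrip
  rw [List.reverse_cons, List.dropWhile_append]
  split_ifs with h
  · rw [List.isEmpty_iff] at h
    simp [h, hc]
  · simp

lemma pv_mem_rstrip (x : Char) (l : List Char) (hx : PySem.Chars.isspace x = false) :
    x ∈ PySem.Chars.rstrip l ↔ x ∈ l := by
  obtain ⟨w, hw, hws⟩ := pv_rstrip_exists l
  constructor
  · intro h; rw [hw]; exact List.mem_append_left _ h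
  · intro h
    rw [hw] at h
    rcases List.mem_append.mp h with h1 | h1
    · exact h1
    · exact absurd (hws x h1) (by simp [hx])

lemma pv_takeWhile_append_of_mem {p : Char → Bool} (a w : List Char) (h : ∃ y ∈ a, p y = false) :
    (a ++ w).takeWhile p = a.takeWhile p := by
  rw [List.takeWhile_append]
  split_ifs with hl
  · exfalso
    have heq : a.takeWhile p = a :=
      (List.takeWhile_prefix (l := a) (p := p)).eq_of_length hl
    obtain ⟨y, hy, hpy⟩ := h
    have := List.takeWhile_eq_self_iff.mp heq y hy
    simp [hpy] at this
  · rfl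

lemma pv_head_dropWhile {p : Char → Bool} : ∀ (l : List Char) {c : Char} {lt : List Char},
    l.dropWhile p = c :: lt → p c = false := by
  intro l
  induction l with
  | nil => intro c lt h; simp at h
  | cons x rest ih =>
    intro c lt h
    by_cases hp : p x
    · rw [List.dropWhile_cons_of_pos hp] at h
      exact ih h
    · rw [List.dropWhile_cons_of_neg hp] at h
      cases h
      simpa using hp

lemma pv_isIn_singleton (c : Char) (s : List Char) :
    PySem.Chars.isIn [c] s = s.contains c := by
  by_cases h : c ∈ s
  · have h1 : [c] <:+: s := by
      obtain ⟨p, q, rfl⟩ := List.append_of_mem h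
      exact ⟨p, q, by simp⟩
    have h2 : PySem.Chars.isIn [c] s = true := (PySem.Chars.isIn_iff_infix _ _).mpr h1
    simp [h2, h]
  · have h2 : PySem.Chars.isIn [c] s ≠ true := by
      intro hh
      exact h (((PySem.Chars.isIn_iff_infix _ _).mp hh).subset (by simp))
    simp only [Bool.not_eq_true] at h2
    simp [h2, h]

lemma pv_strIsspace_single (c : Char) : PySem.Chars.strIsspace [c] = PySem.Chars.isspace c := by
  simp [PySem.Chars.strIsspace]

lemma pv_strip_lstrip (l : List Char) :
    PySem.Chars.strip l = PySem.Chars.rstrip (l.dropWhile PySem.Chars.isspace) := by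
  simp [PySem.Chars.strip, PySem.Chars.lstrip]

lemma pv_cond_eq (l : List Char) :
    (PySem.Chars.startswith (PySem.Chars.strip l) ['['] && PySem.Chars.isIn [']'] (PySem.Chars.strip l))
      = (((l.dropWhile PySem.Chars.isspace).headD '\x00' == '[')
          && (l.dropWhile PySem.Chars.isspace).tail.contains ']') := by
  rw [pv_strip_lstrip]
  cases hdw : l.dropWhile PySem.Chars.isspace with
  | nil => simp [PySem.Chars.rstrip, PySem.Chars.startswith, List.isPrefixOf]
  | cons c lt =>
    have hc : PySem.Chars.isspace c = false := pv_head_dropWhile l hdw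
    rw [pv_rstrip_cons c lt hc]
    by_cases hcb : c = '['
    · subst hcb
      simp only [PySem.Chars.startswith, List.isPrefixOf, BEq.rfl, Bool.and_true, List.headD_cons,
        List.isPrefixOf_nil_left, Bool.true_and, List.tail_cons]
      rw [pv_isIn_singleton]
      by_cases hm : ']' ∈ lt
      · have h1 : ']' ∈ PySem.Chars.rstrip lt := (pv_mem_rstrip _ _ (by decide)).mpr hm
        have h2 : ']' ∈ '[' :: PySem.Chars.rstrip lt := List.mem_cons_of_mem _ h1
        simp [hm, h2]
      · have h1 : ']' ∉ '[' :: PySem.Chars.rstrip lt := by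
          intro hh
          rcases List.mem_cons.mp hh with h2 | h2
          · exact absurd h2 (by decide)
          · exact hm ((pv_mem_rstrip _ _ (by decide)).mp h2)
        simp [hm, h1]
    · have h1 : ('[' == c) = false := by simp [Ne.symm hcb]
      have h2 : (c == '[') = false := by simp [hcb]
      simp [PySem.Chars.startswith, List.isPrefixOf, h1, h2]

lemma pv_take_no_nl (a rest : List Char) (h : '\n' ∉ a) :
    (a ++ '\n' :: rest).takeWhile (fun c => !(c == '\n')) = a := by
  induction a with
  | nil => simp
  | cons x a' ih =>
    have hx : ¬ x = '\n' := fun hh => h (by simp [hh])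
    have hxb : (x == '\n') = false := by simp [hx]
    simp only [List.cons_append, List.takeWhile_cons, hxb, Bool.not_false, if_true]
    exact congrArg (x :: ·) (ih (fun hh => h (List.mem_cons_of_mem _ hh)))

lemma pv_drop_no_nl (a rest : List Char) (h : '\n' ∉ a) :
    (a ++ '\n' :: rest).dropWhile (fun c => !(c == '\n')) = '\n' :: rest := by
  induction a with
  | nil => simp
  | cons x a' ih =>
    have hx : ¬ x = '\n' := fun hh => h (by simp [hh])
    have hxb : (x == '\n') = false := by simp [hx]
    simp only [List.cons_append, List.dropWhile_cons, hxb, Bool.not_false, if_true]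
    exact ih (fun hh => h (List.mem_cons_of_mem _ hh))

lemma pv_take_all_no_nl (a : List Char) (h : '\n' ∉ a) :
    a.takeWhile (fun c => !(c == '\n')) = a := by
  rw [List.takeWhile_eq_self_iff.mpr]
  intro x hx
  have : ¬ x = '\n' := fun e => h (e ▸ hx)
  simp [this]

-- A's result on a matching line, rewritten to takeWhile/dropWhile form
lemma pv_result_eq (l lt : List Char) (h : l.dropWhile PySem.Chars.isspace = '[' :: lt)
    (hmem : ']' ∈ lt) :
    (String.ofList (PySem.Chars.strip (PySem.List.pyGetD
        (PySem.Chars.splitOnMax (PySem.List.pyGetD (PySem.Chars.splitOn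
          (PySem.List.slice (PySem.Chars.strip l) (some 1) none) [']']) 0 []) [','] 1) 0 [])),
     String.ofList (if 1 < (PySem.Chars.splitOnMax (PySem.List.pyGetD (PySem.Chars.splitOn
          (PySem.List.slice (PySem.Chars.strip l) (some 1) none) [']']) 0 []) [','] 1).length
        then PySem.Chars.strip (PySem.List.pyGetD
          (PySem.Chars.splitOnMax (PySem.List.pyGetD (PySem.Chars.splitOn
            (PySem.List.slice (PySem.Chars.strip l) (some 1) none) [']']) 0 []) [','] 1) 1 [])
        else []))
    = (if (lt.takeWhile (fun c => !(c == ']'))).contains ',' then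
        (String.ofList (PySem.Chars.strip ((lt.takeWhile (fun c => !(c == ']'))).takeWhile (fun c => !(c == ',')))),
         String.ofList (PySem.Chars.strip (((lt.takeWhile (fun c => !(c == ']'))).dropWhile (fun c => !(c == ','))).tail)))
      else (String.ofList (PySem.Chars.strip (lt.takeWhile (fun c => !(c == ']')))), "")) := by
  rw [show PySem.Chars.strip l = '[' :: PySem.Chars.rstrip lt from by
    rw [pv_strip_lstrip l, h, pv_rstrip_cons '[' lt (by decide)]]
  have hsl : PySem.List.slice ('[' :: PySem.Chars.rstrip lt) (some 1) none
      = PySem.Chars.rstrip lt := by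
    rw [PySem.List.slice_from_one]
    rfl
  rw [hsl, pv_splitOn_head]
  have hcnt : (PySem.Chars.rstrip lt).takeWhile (fun x => !(x == ']'))
      = lt.takeWhile (fun c => !(c == ']')) := by
    obtain ⟨w, hw, hws⟩ := pv_rstrip_exists lt
    conv_rhs => rw [hw]
    rw [pv_takeWhile_append_of_mem]
    exact ⟨']', (pv_mem_rstrip _ _ (by decide)).mpr hmem, by simp⟩
  rw [hcnt, pv_splitOnMax_one]
  by_cases hm : ',' ∈ lt.takeWhile (fun c => !(c == ']'))
  · have hct : (lt.takeWhile (fun c => !(c == ']'))).contains ',' = true := by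
      simpa using hm
    simp only [hm, if_true, hct]
    simp [PySem.List.pyGetD, PySem.List.pyGet?, PySem.List.pyIdx?]
  · have hct : (lt.takeWhile (fun c => !(c == ']'))).contains ',' = false := by
      simpa using hm
    simp only [hm, if_false, hct]
    simp [PySem.List.pyGetD, PySem.List.pyGet?, PySem.List.pyIdx?]

-- ===== characterisations of B's states =====

-- SKIP consumes the rest of the line, then resumes at line start (or ends)
lemma pv_skip_char : ∀ (u : List Char) (s f : List Char),
    pvB_step u 3 s f
      = if '\n' ∈ u then pvB_step ((u.dropWhile (fun c => !(c == '\n'))).tail) 0 s f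
        else ("", "") := by
  intro u
  induction u with
  | nil => intro s f; simp [pvB_step]
  | cons ch r ih =>
    intro s f
    by_cases hc : ch = '\n'
    · subst hc
      simp [pvB_step]
    · have hcb : (ch == '\n') = false := by simp [hc]
      have hmem : '\n' ∈ ch :: r ↔ '\n' ∈ r := by simp [Ne.symm hc]
      simp only [pvB_step, hcb, Bool.false_eq_true, if_false, List.dropWhile_cons,
        Bool.not_false, if_true, hmem]
      exact ih s f
    
-- FIT collects chars until ']' (result) or '\n' (reset) or end of input
lemma pv_fit_char : ∀ (u : List Char) (s f : List Char),
    pvB_step u 2 s f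
      = if ']' ∈ u.takeWhile (fun c => !(c == '\n')) then
          (String.ofList (PySem.Chars.strip s),
           String.ofList (PySem.Chars.strip (f ++ (u.takeWhile (fun c => !(c == '\n'))).takeWhile (fun c => !(c == ']')))))
        else if '\n' ∈ u then pvB_step ((u.dropWhile (fun c => !(c == '\n'))).tail) 0 [] []
        else ("", "") := by
  intro u
  induction u with
  | nil => intro s f; simp [pvB_step]
  | cons ch r ih =>
    intro s f
    by_cases hnl : ch = '\n'
    · subst hnl
      simp [pvB_step]
    · have hnlb : (ch == '\n') = false := by simp [hnl]
      by_cases hrb : ch = ']'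
      · subst hrb
        simp [pvB_step]
      · have hrbb : (ch == ']') = false := by simp [hrb]
        have hstep : pvB_step (ch :: r) 2 s f = pvB_step r 2 s (f ++ [ch]) := by
          simp [pvB_step, hnlb, hrbb]
        have hmem : '\n' ∈ ch :: r ↔ '\n' ∈ r := by simp [Ne.symm hnl]
        rw [hstep, ih s (f ++ [ch])]
        simp only [List.takeWhile_cons, hnlb, Bool.not_false, if_true, List.dropWhile_cons,
          hmem]
        by_cases hm : ']' ∈ r.takeWhile (fun c => !(c == '\n'))
        · have hm2 : ']' ∈ ch :: r.takeWhile (fun c => !(c == '\n')) := List.mem_cons_of_mem _ hm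
          simp [hm, hm2, hrbb]
        · have hm2 : ']' ∉ ch :: r.takeWhile (fun c => !(c == '\n')) := by
            intro hh
            rcases List.mem_cons.mp hh with h1 | h1
            · exact hrb h1.symm
            · exact hm h1
          simp [hm, hm2]

-- SHIP collects ship chars; on ',' it switches to FIT, on ']' it returns,
-- on '\n' it resets, at end of input it returns ("","")
lemma pv_ship_char : ∀ (u : List Char) (s : List Char),
    pvB_step u 1 s []
      = if ']' ∈ u.takeWhile (fun c => !(c == '\n')) then
          (let content := (u.takeWhile (fun c => !(c == '\n'))).takeWhile (fun c => !(c == ']'));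
           if ',' ∈ content then
             (String.ofList (PySem.Chars.strip (s ++ content.takeWhile (fun c => !(c == ',')))),
              String.ofList (PySem.Chars.strip ((content.dropWhile (fun c => !(c == ','))).tail)))
           else (String.ofList (PySem.Chars.strip (s ++ content)), ""))
        else if '\n' ∈ u then pvB_step ((u.dropWhile (fun c => !(c == '\n'))).tail) 0 [] []
        else ("", "") := by
  intro u
  induction u with
  | nil => intro s; simp [pvB_step]
  | cons ch r ih =>
    intro s
    by_cases hnl : ch = '\n'
    · subst hnl
      simp [pvB_step]
    · have hnlb : (ch == '\n') = false := by simp [hnl]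
      by_cases hrb : ch = ']'
      · subst hrb
        simp [pvB_step]
      · have hrbb : (ch == ']') = false := by simp [hrb]
        have hmem : '\n' ∈ ch :: r ↔ '\n' ∈ r := by simp [Ne.symm hnl]
        by_cases hcm : ch = ','
        · subst hcm
          have hstep : pvB_step (',' :: r) 1 s [] = pvB_step r 2 s [] := by
            simp [pvB_step]
          rw [hstep, pv_fit_char r s []]
          simp only [List.takeWhile_cons, hnlb, Bool.not_false, if_true, List.dropWhile_cons,
            hmem]
          by_cases hm : ']' ∈ r.takeWhile (fun c => !(c == '\n'))
          · have hm2 : ']' ∈ ',' :: r.takeWhile (fun c => !(c == '\n')) :=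
              List.mem_cons_of_mem _ hm
            have hcomma : ',' ∈ (',' :: r.takeWhile (fun c => !(c == '\n'))).takeWhile
                (fun c => !(c == ']')) := by
              simp [List.takeWhile_cons]
            simp [hm, hm2, hcomma, List.takeWhile_cons, List.dropWhile_cons]
          · have hm2 : ']' ∉ ',' :: r.takeWhile (fun c => !(c == '\n')) := by
              intro hh
              rcases List.mem_cons.mp hh with h1 | h1
              · exact absurd h1 (by decide)
              · exact hm h1
            simp [hm, hm2]
        · have hcmb : (ch == ',') = false := by simp [hcm]
          have hstep : pvB_step (ch :: r) 1 s [] = pvB_step r 1 (s ++ [ch]) [] := by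
            simp [pvB_step, hnlb, hrbb, hcmb]
          rw [hstep, ih (s ++ [ch])]
          simp only [List.takeWhile_cons, hnlb, Bool.not_false, if_true, List.dropWhile_cons,
            hmem]
          have hrb' : ¬ (']') = ch := fun h => hrb h.symm
          have hcm' : ¬ (',') = ch := fun h => hcm h.symm
          by_cases hm : ']' ∈ r.takeWhile (fun c => !(c == '\n'))
          · by_cases hcwm : ',' ∈ (r.takeWhile (fun c => !(c == '\n'))).takeWhile (fun c => !(c == ']'))
            · simp [hm, hrb, hrb', hcm', hcwm, List.takeWhile_cons, List.dropWhile_cons,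
                hrbb, hcmb]
            · simp [hm, hrb, hrb', hcm', hcwm, List.takeWhile_cons, hrbb, hcmb]
          · simp [hm, hrb']

-- NEWLINE over one whole line l (no '\n' in l) followed by '\n' :: rest
lemma pv_newline_line : ∀ (l : List Char), '\n' ∉ l → ∀ (rest s f : List Char),
    pvB_step (l ++ '\n' :: rest) 0 s f
      = match l.dropWhile PySem.Chars.isspace with
        | [] => pvB_step rest 0 s f
        | c :: t => if c == '[' then pvB_step (t ++ '\n' :: rest) 1 s f
                    else pvB_step (t ++ '\n' :: rest) 3 s f := by
  intro l
  induction l with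
  | nil =>
    intro _ rest s f
    simp [pvB_step, pv_strIsspace_single, show PySem.Chars.isspace '\n' = true from by decide]
  | cons x l' ih =>
    intro hnl rest s f
    have hnl' : '\n' ∉ l' := fun h => hnl (List.mem_cons_of_mem _ h)
    by_cases hws : PySem.Chars.isspace x
    · have hstep : pvB_step ((x :: l') ++ '\n' :: rest) 0 s f
          = pvB_step (l' ++ '\n' :: rest) 0 s f := by
        simp [pvB_step, pv_strIsspace_single, hws]
      rw [hstep, ih hnl' rest s f]
      simp [List.dropWhile_cons, hws]
    · simp only [Bool.not_eq_true] at hws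
      have hdw : (x :: l').dropWhile PySem.Chars.isspace = x :: l' := by
        simp [List.dropWhile_cons, hws]
      rw [hdw]
      by_cases hx : x = '['
      · subst hx
        simp [pvB_step, pv_strIsspace_single, hws]
      · have hxb : (x == '[') = false := by simp [hx]
        simp [pvB_step, pv_strIsspace_single, hws, hxb]

-- NEWLINE over the last line (no '\n' at all)
lemma pv_newline_last : ∀ (cs : List Char), '\n' ∉ cs → ∀ (s f : List Char),
    pvB_step cs 0 s f
      = match cs.dropWhile PySem.Chars.isspace with
        | [] => ("", "")
        | c :: t => if c == '[' then pvB_step t 1 s f else pvB_step t 3 s f := by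
  intro cs
  induction cs with
  | nil => intro _ s f; simp [pvB_step]
  | cons x l' ih =>
    intro hnl s f
    have hnl' : '\n' ∉ l' := fun h => hnl (List.mem_cons_of_mem _ h)
    by_cases hws : PySem.Chars.isspace x
    · have hstep : pvB_step (x :: l') 0 s f = pvB_step l' 0 s f := by
        simp [pvB_step, pv_strIsspace_single, hws]
      rw [hstep, ih hnl' s f]
      simp [List.dropWhile_cons, hws]
    · simp only [Bool.not_eq_true] at hws
      have hdw : (x :: l').dropWhile PySem.Chars.isspace = x :: l' := by
        simp [List.dropWhile_cons, hws]
      rw [hdw]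
      by_cases hx : x = '['
      · subst hx
        simp [pvB_step, pv_strIsspace_single, hws]
      · have hxb : (x == '[') = false := by simp [hx]
        simp [pvB_step, pv_strIsspace_single, hws, hxb]

-- ===== main induction: B's state machine = A's line loop =====
lemma pv_main : ∀ (n : Nat) (cs : List Char), cs.length ≤ n →
    pvB_step cs 0 [] [] = pvA_loop (PySem.Chars.splitOn cs ['\n']) := by
  intro n
  induction n with
  | zero =>
    intro cs h
    have hcs : cs = [] := by cases cs <;> simp_all
    subst hcs
    rw [pv_splitOn_eq]
    simp [pvB_step, pvA_loop, List.splitOnP_nil, PySem.Chars.strip, PySem.Chars.lstrip,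
      PySem.Chars.rstrip, PySem.Chars.startswith, List.isPrefixOf]
  | succ n ih =>
    intro cs hlen
    by_cases hmem : '\n' ∈ cs
    · have hbreak := pv_break_at '\n' cs hmem
      set l := cs.takeWhile (fun x => !(x == '\n')) with hldef
      set rest := (cs.dropWhile (fun x => !(x == '\n'))).tail with hrestdef
      have hnl : '\n' ∉ l := fun hx => by simpa using List.mem_takeWhile_imp hx
      have hsplit : PySem.Chars.splitOn cs ['\n'] = l :: PySem.Chars.splitOn rest ['\n'] := by
        rw [pv_splitOn_eq, pv_splitOnP_of_mem '\n' cs hmem, ← pv_splitOn_eq]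
      have hlen' : rest.length ≤ n := by
        have h1 : cs.length = l.length + (rest.length + 1) := by
          conv_lhs => rw [hbreak]
          simp
        omega
      rw [hsplit]
      conv_lhs => rw [hbreak]
      rw [pv_newline_line l hnl rest [] []]
      simp only [pvA_loop, pv_cond_eq l]
      cases hdw : l.dropWhile PySem.Chars.isspace with
      | nil =>
        simp only [List.headD_nil, show (('\x00' == '[') = false) from by decide,
          Bool.false_and, Bool.false_eq_true, if_false]
        exact ih rest hlen'
      | cons c t =>
        have hnlt : '\n' ∉ t := by
          intro hx
          exact hnl ((List.dropWhile_sublist PySem.Chars.isspace).subset (hdw ▸ List.mem_cons_of_mem _ hx))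
        by_cases hc : c = '['
        · subst hc
          simp only [List.headD_cons, BEq.rfl, Bool.true_and, List.tail_cons, if_true]
          rw [pv_ship_char (t ++ '\n' :: rest) []]
          rw [pv_take_no_nl t rest hnlt, pv_drop_no_nl t rest hnlt]
          by_cases hmt : ']' ∈ t
          · have hct : t.contains ']' = true := by simpa using hmt
            simp only [hmt, if_true, hct]
            rw [pv_result_eq l t hdw hmt]
            simp
          · have hct : t.contains ']' = false := by simpa using hmt
            simp only [hmt, if_false, hct, Bool.and_false, Bool.false_eq_true]
            rw [if_pos (show '\n' ∈ t ++ '\n' :: rest by simp)]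
            simp only [List.tail_cons, if_false]
            exact ih rest hlen'
        · have hcb : (c == '[') = false := by simp [hc]
          simp only [List.headD_cons, hcb, Bool.false_and, Bool.false_eq_true, if_false]
          rw [pv_skip_char]
          have hmem2 : '\n' ∈ t ++ '\n' :: rest := by simp
          rw [if_pos hmem2, pv_drop_no_nl t rest hnlt]
          simp only [List.tail_cons]
          exact ih rest hlen'
    · have hsplit : PySem.Chars.splitOn cs ['\n'] = [cs] := by
        rw [pv_splitOn_eq, List.splitOnP_eq_single]
        intro x hx
        simp only [beq_iff_eq]
        exact fun e => hmem (e ▸ hx)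
      rw [hsplit, pv_newline_last cs hmem [] []]
      simp only [pvA_loop, pv_cond_eq cs]
      cases hdw : cs.dropWhile PySem.Chars.isspace with
      | nil =>
        simp only [List.headD_nil, show (('\x00' == '[') = false) from by decide,
          Bool.false_and, Bool.false_eq_true, if_false]
      | cons c t =>
        have hnlt : '\n' ∉ t := by
          intro hx
          exact hmem ((List.dropWhile_sublist PySem.Chars.isspace).subset (hdw ▸ List.mem_cons_of_mem _ hx))
        by_cases hc : c = '['
        · subst hc
          simp only [List.headD_cons, BEq.rfl, Bool.true_and, List.tail_cons, if_true]
          rw [pv_ship_char t []]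
          rw [pv_take_all_no_nl t hnlt]
          by_cases hmt : ']' ∈ t
          · have hct : t.contains ']' = true := by simpa using hmt
            simp only [hmt, if_true, hct]
            rw [pv_result_eq cs t hdw hmt]
            simp
          · have hct : t.contains ']' = false := by simpa using hmt
            have hnm : '\n' ∉ t := hnlt
            simp only [hmt, if_false, hct, Bool.and_false, Bool.false_eq_true]
            simp [pvA_loop, hnm]
        · have hcb : (c == '[') = false := by simp [hc]
          simp only [List.headD_cons, hcb, Bool.false_and, Bool.false_eq_true, if_false]
          rw [pv_skip_char]
          have hnm : '\n' ∉ t := hnlt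
          simp [pvA_loop, hnm]

-- ===== VERDICT (by name: the statement is the Claim_ definition above) =====
theorem parse_eft_header_py_spec : Claim_equal_parse_eft_header_py := by
  intro eft _
  unfold Spec_parse_eft_header_py parse_eft_header_py parse_eft_header_py_alt
  exact (pv_main (PySem.Chars.strip eft.toList).length _ le_rfl).symm
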